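-- pv_equiv track=rewrite | github.com/puhakkaJ/NOKIA_daily_coding_challenges | 20210531/20210602/factorials.py | filter_factorials
-- ===== SOURCE A (Python) =====
-- import typing
-- import math
--
-- def filter_factorials(numbers: typing.List[int]) -> typing.List[int]:
--     factorials = []
--
--     for number in numbers:
--         i = 1
--
--         while math.factorial(i) < number:
--             i += 1
--
--         if math.factorial(i) == number:
--             factorials.append(number)
--
--     return factorials
-- ===== SOURCE B (Python) =====
-- def filter_factorials(numbers):
--     def is_factorial(n):
--         if n < 1:
--             return False
--         d = 1
--         n2 = n
--         while n2 > 1: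
--             d += 1
--             if n2 % d != 0:
--                 return False
--             n2 //= d
--         return True
--     return [n for n in numbers if is_factorial(n)]
-- ===== Notes on version B (the rewrite author's own statement) =====
-- stated objective: alternative
-- what changed: Replaces the per-number 'rebuild factorials upward until >= n and compare' loop with a downward trial-division predicate that divides n by 2,3,4,... and keeps n iff it reduces exactly to 1 (with n>=1), applied as a list-comprehension filter.
import Mathlib
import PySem

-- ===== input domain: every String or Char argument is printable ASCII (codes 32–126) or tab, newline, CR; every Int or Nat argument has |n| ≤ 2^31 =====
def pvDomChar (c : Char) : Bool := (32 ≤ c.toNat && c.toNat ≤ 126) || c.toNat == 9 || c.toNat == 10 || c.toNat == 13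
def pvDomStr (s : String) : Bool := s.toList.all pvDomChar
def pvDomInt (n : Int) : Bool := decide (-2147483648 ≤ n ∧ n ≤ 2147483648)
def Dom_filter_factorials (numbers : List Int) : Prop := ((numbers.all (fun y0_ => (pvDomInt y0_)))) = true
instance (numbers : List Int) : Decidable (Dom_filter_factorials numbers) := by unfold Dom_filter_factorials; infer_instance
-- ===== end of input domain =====

-- B keeps a number by trial-dividing it downward (n/2/3/…) instead of rebuilding factorials upward as A does: an alternative algorithm of similar cost, proved to return exactly A's list.

-- ===== PORT A =====
-- the 'while math.factorial(i) < number: i += 1' loop: returns the final value of i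
def factLoop (n : Int) (i : Nat) : Nat :=
  if (Nat.factorial i : Int) < n then factLoop n (i + 1) else i
termination_by n.toNat - i
decreasing_by
  have h1 : (i : Int) ≤ (Nat.factorial i : Int) := by exact_mod_cast Nat.self_le_factorial i
  omega

def filter_factorials (numbers : List Int) : List Int :=
  numbers.foldl (fun factorials number =>
    if (Nat.factorial (factLoop number 1) : Int) = number then factorials ++ [number]
    else factorials) []

-- ===== PORT B =====
-- the 'while n2 > 1' loop of Source B's is_factorial; Python's d starts at 1 and only
-- increments, so it is carried as the Nat offset dm1 = d - 1 (the divisor tried is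
-- d + 1 = dm1 + 2); exact for every reachable state.
def divLoop (dm1 : Nat) (n2 : Int) : Bool :=
  if 1 < n2 then
    if PySem.Int.mod n2 ((dm1 : Int) + 2) ≠ 0 then false
    else divLoop (dm1 + 1) (PySem.Int.floordiv n2 ((dm1 : Int) + 2))
  else true
termination_by n2.toNat
decreasing_by
  rename_i h _
  rw [show n2 = ((n2.toNat : Nat) : Int) by omega,
      show ((dm1 : Int) + 2) = ((dm1 + 2 : Nat) : Int) by push_cast; ring,
      PySem.Int.floordiv_natCast]
  simp only [Int.toNat_natCast]
  exact Nat.div_lt_self (by omega) (by omega)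

def isFactorialB (n : Int) : Bool :=
  if n < 1 then false else divLoop 0 n

def filter_factorials_alt (numbers : List Int) : List Int :=
  numbers.filter isFactorialB

-- ===== PRECONDITION & SPEC =====
def Spec_filter_factorials (numbers : List Int) (out : List Int) : Prop := out = filter_factorials_alt numbers
instance (numbers : List Int) (out : List Int) : Decidable (Spec_filter_factorials numbers out) := by unfold Spec_filter_factorials; infer_instance

-- ===== CLAIM (what is proved, stated in full; the proofs are below) =====
def Claim_equal_filter_factorials : Prop := ∀ (numbers : List Int), Dom_filter_factorials numbers → Spec_filter_factorials numbers (filter_factorials numbers)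

-- ===== LEMMAS AND PROOFS =====

lemma factLoop_ge (n : Int) (i : Nat) : i ≤ factLoop n i := by
  fun_induction factLoop <;> omega

lemma factLoop_exact (k : Nat) : ∀ (m i : Nat), i ≤ k → k - i ≤ m →
    Nat.factorial (factLoop (Nat.factorial k : Int) i) = Nat.factorial k := by
  intro m
  induction m with
  | zero =>
    intro i hik h0
    have hik' : i = k := by omega
    subst hik'
    rw [factLoop, if_neg (by omega)]
  | succ m ih =>
    intro i hik hm
    rw [factLoop]
    split
    · rename_i h
      have hlt : Nat.factorial i < Nat.factorial k := by exact_mod_cast h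
      have hik' : i < k := by
        by_contra hc
        exact absurd (Nat.factorial_le (show k ≤ i by omega)) (by omega)
      exact ih (i + 1) (by omega) (by omega)
    · rename_i h
      have h1 : Nat.factorial i ≤ Nat.factorial k := Nat.factorial_le hik
      have h2 : Nat.factorial k ≤ Nat.factorial i := by
        have := not_lt.mp h
        exact_mod_cast this
      omega

lemma predA_iff (n : Int) :
    ((Nat.factorial (factLoop n 1) : Int) = n) ↔ ∃ k : Nat, 1 ≤ k ∧ (Nat.factorial k : Int) = n := by
  constructor
  · intro h
    exact ⟨factLoop n 1, factLoop_ge n 1, h⟩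
  · rintro ⟨k, hk1, rfl⟩
    exact_mod_cast congrArg (Nat.cast : Nat → Int) (factLoop_exact k (k - 1) 1 hk1 (by omega))

lemma k_ge (m dm1 k : Nat) (hm : 2 ≤ m) (hk : dm1 + 1 ≤ k)
    (he : m * Nat.factorial (dm1 + 1) = Nat.factorial k) : dm1 + 2 ≤ k := by
  by_contra hc
  have hkk : k = dm1 + 1 := by omega
  subst hkk
  have hpos : 0 < Nat.factorial (dm1 + 1) := Nat.factorial_pos _
  have : m = 1 := by
    have h1 : m * Nat.factorial (dm1 + 1) = 1 * Nat.factorial (dm1 + 1) := by omega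
    exact Nat.eq_of_mul_eq_mul_right hpos h1
  omega

lemma dvd_of_eq_fact (m dm1 k : Nat) (hm : 2 ≤ m) (hk : dm1 + 1 ≤ k)
    (he : m * Nat.factorial (dm1 + 1) = Nat.factorial k) : (dm1 + 2) ∣ m := by
  have hk2 := k_ge m dm1 k hm hk he
  obtain ⟨c, hc⟩ := Nat.factorial_dvd_factorial hk2
  have hstep : Nat.factorial (dm1 + 2) = (dm1 + 2) * Nat.factorial (dm1 + 1) := rfl
  have hpos : 0 < Nat.factorial (dm1 + 1) := Nat.factorial_pos _
  have h1 : m * Nat.factorial (dm1 + 1) = ((dm1 + 2) * c) * Nat.factorial (dm1 + 1) := by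
    rw [he, hc, hstep]; ring
  have : m = (dm1 + 2) * c := Nat.eq_of_mul_eq_mul_right hpos h1
  exact ⟨c, this⟩

lemma divLoop_iff (m : Nat) : ∀ (dm1 : Nat), 1 ≤ m →
    (divLoop dm1 (m : Int) = true ↔ ∃ k : Nat, dm1 + 1 ≤ k ∧ m * Nat.factorial (dm1 + 1) = Nat.factorial k) := by
  induction m using Nat.strong_induction_on with
  | _ m ih =>
    intro dm1 hm1
    by_cases hm : m = 1
    · subst hm
      rw [divLoop, if_neg (by norm_num)]
      constructor
      · intro _
        exact ⟨dm1 + 1, le_refl _, one_mul _⟩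
      · intro _; rfl
    · have hm2 : 2 ≤ m := by omega
      have hcast : ((dm1 : Int) + 2) = ((dm1 + 2 : Nat) : Int) := by push_cast; ring
      rw [divLoop, if_pos (by exact_mod_cast hm2), hcast, PySem.Int.mod_natCast]
      by_cases hdvd : (dm1 + 2) ∣ m
      · have hmod : m % (dm1 + 2) = 0 := Nat.dvd_iff_mod_eq_zero.mp hdvd
        rw [if_neg (by simp [hmod]), PySem.Int.floordiv_natCast]
        have hq1 : 1 ≤ m / (dm1 + 2) :=
          (Nat.one_le_div_iff (by omega)).mpr (Nat.le_of_dvd (by omega) hdvd)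
        have hqlt : m / (dm1 + 2) < m := Nat.div_lt_self (by omega) (by omega)
        rw [ih (m / (dm1 + 2)) hqlt (dm1 + 1) hq1]
        have hfac : m / (dm1 + 2) * Nat.factorial (dm1 + 1 + 1) = m * Nat.factorial (dm1 + 1) := by
          rw [show Nat.factorial (dm1 + 2) = (dm1 + 2) * Nat.factorial (dm1 + 1) from rfl,
              ← Nat.mul_assoc, Nat.div_mul_cancel hdvd]
        constructor
        · rintro ⟨k, hk, he⟩
          exact ⟨k, by omega, by omega⟩
        · rintro ⟨k, hk, he⟩
          exact ⟨k, k_ge m dm1 k hm2 hk he, by omega⟩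
      · have hmod : m % (dm1 + 2) ≠ 0 := fun h => hdvd (Nat.dvd_iff_mod_eq_zero.mpr h)
        rw [if_pos (by exact_mod_cast hmod)]
        constructor
        · intro h; cases h
        · rintro ⟨k, hk, he⟩
          exact absurd (dvd_of_eq_fact m dm1 k hm2 hk he) hdvd

lemma predB_iff (n : Int) :
    isFactorialB n = true ↔ ∃ k : Nat, 1 ≤ k ∧ (Nat.factorial k : Int) = n := by
  unfold isFactorialB
  by_cases hn : n < 1
  · rw [if_pos hn]
    constructor
    · intro h; cases h
    · rintro ⟨k, _, rfl⟩
      have := Nat.factorial_pos k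
      omega
  · rw [if_neg hn]
    rw [show n = ((n.toNat : Nat) : Int) by omega]
    rw [divLoop_iff n.toNat 0 (by omega)]
    constructor
    · rintro ⟨k, hk, he⟩
      refine ⟨k, hk, ?_⟩
      simp [Nat.factorial] at he
      exact_mod_cast he.symm
    · rintro ⟨k, hk, he⟩
      refine ⟨k, hk, ?_⟩
      have h2 : Nat.factorial k = n.toNat := by exact_mod_cast he
      simp [Nat.factorial, h2]

lemma pred_eq (n : Int) :
    (decide ((Nat.factorial (factLoop n 1) : Int) = n)) = isFactorialB n := by
  by_cases h : (Nat.factorial (factLoop n 1) : Int) = n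
  · simp [h, (predB_iff n).mpr ((predA_iff n).mp h)]
  · have hb : isFactorialB n = false := by
      cases hb2 : isFactorialB n
      · rfl
      · exact absurd ((predA_iff n).mpr ((predB_iff n).mp hb2)) h
    simp [h, hb]

-- ===== VERDICT (by name: the statement is the Claim_ definition above) =====
theorem filter_factorials_spec : Claim_equal_filter_factorials := by
  intro numbers _
  unfold Spec_filter_factorials filter_factorials filter_factorials_alt
  rw [PySem.List.foldl_append_ite_eq_filter]
  simp only [List.nil_append]
  exact List.filter_congr fun x _ => pred_eq x
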